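-- pv_equiv track=rewrite | github.com/manwar/perlweeklychallenge-club | challenge-191/vamsi-meenavilli/python/ch-2.py | getCuteListCount
-- ===== SOURCE A (Python) =====
-- def getCuteListCount(number):
--     cute_list_count = 0
--     numbers_list = [i for i in range(1, number + 1)]
--
--     for i in range(number):
--         numbers_sub_list = numbers_list[i + 1:] + numbers_list[:i]
--
--         for j in range(number - 1):
--             if isCuteList([numbers_list[i]] + numbers_sub_list[j:] + numbers_sub_list[:j]):
--                 cute_list_count += 1
--
--     return cute_list_count
--
-- def isCuteList(number_list):
--     for index, number in enumerate(number_list, 1):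
--         if not (number % index == 0 or index % number == 0):
--             return 0
--
--     return 1
-- ===== SOURCE B (Python) =====
-- def getCuteListCount(number):
--     # Position-major sieve: for each first value i+1, keep the set of rotation
--     # offsets still alive and filter it position by position (p = 2..number);
--     # a rotation survives iff the value it places at p divides p or vice versa.
--     # The value at position p of rotation j is computed modularly, so no
--     # arrangement list is ever built.  Survivors of all positions are counted.
--     n = number
--     m = n - 1
--     count = 0
--     for i in range(n):
--         alive = list(range(m))
--         for p in range(2, n + 1):
--             alive = [j for j in alive
--                      if ((i + 1 + (j + p - 2) % m) % n + 1) % p == 0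
--                      or p % ((i + 1 + (j + p - 2) % m) % n + 1) == 0]
--         count += len(alive)
--     return count
-- ===== Notes on version B (the rewrite author's own statement) =====
-- stated objective: alternative
-- what changed: B never builds or validates an arrangement: it runs position-major (i, then p, then j), maintaining per first value the list of surviving rotation offsets and filtering it at each position via a modular value formula, then counts the survivors.
import Mathlib
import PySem

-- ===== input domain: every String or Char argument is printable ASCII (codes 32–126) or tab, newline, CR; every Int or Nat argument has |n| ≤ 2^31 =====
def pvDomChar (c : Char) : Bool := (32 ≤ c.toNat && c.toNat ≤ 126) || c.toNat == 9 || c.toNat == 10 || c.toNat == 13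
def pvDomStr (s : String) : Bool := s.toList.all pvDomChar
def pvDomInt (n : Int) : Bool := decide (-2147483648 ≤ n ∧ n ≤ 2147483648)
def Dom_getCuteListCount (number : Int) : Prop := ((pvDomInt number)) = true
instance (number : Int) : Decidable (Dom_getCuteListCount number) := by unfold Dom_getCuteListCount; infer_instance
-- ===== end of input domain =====

-- B is a position-major sieve: per first value it filters the set of surviving rotation offsets
-- position by position (computing each placed value modularly, so no arrangement list is built)
-- and counts the survivors — a different traversal maintaining different state than A.
-- ===== PORT A =====
-- helper isCuteList: early-return loop over enumerate(list, 1)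
def isCuteListAux (index : Int) : List Int → Int
  | [] => 1
  | n :: rest =>
    if ¬ (PySem.Int.mod n index = 0 ∨ PySem.Int.mod index n = 0) then 0
    else isCuteListAux (index + 1) rest

def isCuteList (number_list : List Int) : Int := isCuteListAux 1 number_list

def getCuteListCount (number : Int) : Int :=
  let numbers_list := PySem.List.pyRange 1 (number + 1) 1
  (PySem.List.pyRange 0 number 1).foldl (fun acc i =>
    let numbers_sub_list :=
      PySem.List.slice numbers_list (some (i + 1)) none ++
      PySem.List.slice numbers_list none (some i)
    (PySem.List.pyRange 0 (number - 1) 1).foldl (fun acc2 j =>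
      if isCuteList ((PySem.List.pyGetD numbers_list i 0) ::
          (PySem.List.slice numbers_sub_list (some j) none ++
           PySem.List.slice numbers_sub_list none (some j))) ≠ 0
      then acc2 + 1 else acc2) acc) 0

-- ===== PORT B =====
def getCuteListCount_alt (number : Int) : Int :=
  (PySem.List.pyRange 0 number 1).foldl (fun count i =>
    let alive :=
      (PySem.List.pyRange 2 (number + 1) 1).foldl (fun alive p =>
        alive.filter (fun j =>
          decide (PySem.Int.mod
              (PySem.Int.mod (i + 1 + PySem.Int.mod (j + p - 2) (number - 1)) number + 1) p = 0 ∨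
            PySem.Int.mod p
              (PySem.Int.mod (i + 1 + PySem.Int.mod (j + p - 2) (number - 1)) number + 1) = 0)))
        (PySem.List.pyRange 0 (number - 1) 1)
    count + (alive.length : Int)) 0

-- ===== PRECONDITION & SPEC =====
def Spec_getCuteListCount (number : Int) (out : Int) : Prop := out = getCuteListCount_alt number
instance (number : Int) (out : Int) : Decidable (Spec_getCuteListCount number out) := by unfold Spec_getCuteListCount; infer_instance

-- ===== CLAIM (what is proved, stated in full; the proofs are below) =====
def Claim_equal_getCuteListCount : Prop := ∀ (number : Int), Dom_getCuteListCount number → Spec_getCuteListCount number (getCuteListCount number)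

-- ===== LEMMAS AND PROOFS =====

-- value placed at position p (2 ≤ p ≤ n) by the arrangement with first value i+1 and rotation j
def valF (n i j p : Int) : Int :=
  PySem.Int.mod (i + 1 + PySem.Int.mod (j + p - 2) (n - 1)) n + 1

-- Boolean "arrangement (i, j) is cute" in closed modular form
def goodB (n i j : Int) : Bool :=
  (PySem.List.pyRange 2 (n + 1) 1).all (fun p =>
    decide (PySem.Int.mod (valF n i j p) p = 0 ∨ PySem.Int.mod p (valF n i j p) = 0))

theorem isCuteListAux_ne_zero (xs : List Int) : ∀ idx : Int,
    (isCuteListAux idx xs ≠ 0 ↔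
      ∀ k : Nat, (h : k < xs.length) →
        (PySem.Int.mod xs[k] (idx + k) = 0 ∨ PySem.Int.mod (idx + k) xs[k] = 0)) := by
  induction xs with
  | nil => intro idx; simp [isCuteListAux]
  | cons x rest ih =>
    intro idx
    simp only [isCuteListAux]
    by_cases hc : (PySem.Int.mod x idx = 0 ∨ PySem.Int.mod idx x = 0)
    · simp only [hc, not_true_eq_false, if_false, ih (idx + 1)]
      constructor
      · intro h k hk
        cases k with
        | zero => simpa using hc
        | succ k' =>
          have := h k' (by simpa using Nat.lt_of_succ_lt_succ hk)
          simpa [add_assoc, add_comm, add_left_comm] using this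
      · intro h k hk
        have := h (k+1) (by simpa using Nat.succ_lt_succ hk)
        simpa [add_assoc, add_comm, add_left_comm] using this
    · simp only [hc, not_false_eq_true, if_true]
      constructor
      · intro h; exact absurd rfl h
      · intro h
        exact absurd (by simpa using h 0 (by simp)) hc

theorem rotGetD (s : List Int) (m j t : Int) (hlen : (s.length : Int) = m)
    (hj : 0 ≤ j) (hjm : j < m) (ht : 0 ≤ t) (htm : t < m) :
    PySem.List.pyGetD (s.drop j.toNat ++ s.take j.toNat) t 0
      = PySem.List.pyGetD s (PySem.Int.mod (j + t) m) 0 := by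
  have hm : 0 < m := lt_of_le_of_lt hj hjm
  rw [PySem.Int.mod_eq_emod_of_pos hm]
  have hr0 : 0 ≤ (j + t) % m := Int.emod_nonneg _ (by omega)
  have hrm : (j + t) % m < m := Int.emod_lt_of_pos _ hm
  rw [PySem.List.pyGetD_eq_getElem _ _ ht (by simp; omega),
      PySem.List.pyGetD_eq_getElem _ _ hr0 (by omega)]
  by_cases hcase : t.toNat < (s.drop j.toNat).length
  · rw [List.getElem_append_left hcase, List.getElem_drop]
    have hlt : j + t < m := by simp at hcase; omega
    have he : (j + t) % m = j + t := Int.emod_eq_of_lt (by omega) hlt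
    have hab : j.toNat + t.toNat = ((j + t) % m).toNat := by rw [he]; omega
    simp only [hab]
  · rw [List.getElem_append_right (by omega), List.getElem_take]
    have hge : m ≤ j + t := by simp at hcase; omega
    have he : (j + t) % m = j + t - m := by
      rw [← Int.sub_emod_right (j + t) m]
      exact Int.emod_eq_of_lt (by omega) (by omega)
    have hab : t.toNat - (s.drop j.toNat).length = ((j + t) % m).toNat := by
      rw [he]; simp; omega
    simp only [hab]

theorem subEqRem (n i : Int) (hn : 2 ≤ n) (hi0 : 0 ≤ i) (hin : i < n) :
    (PySem.List.pyRange 1 (n+1) 1).drop (i+1).toNat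
      ++ (PySem.List.pyRange 1 (n+1) 1).take i.toNat
    = (PySem.List.pyRange 0 (n-1) 1).map (fun k => PySem.Int.mod (i+1+k) n + 1) := by
  apply List.ext_getElem
  · simp [PySem.List.length_pyRange_one]; omega
  · intro k h1 h2
    have hlen : (PySem.List.pyRange 1 (n+1) 1).length = n.toNat := by
      rw [PySem.List.length_pyRange_one]; omega
    have hkm : k < (n-1).toNat := by
      simp [PySem.List.length_pyRange_one] at h2; omega
    rw [List.getElem_map, PySem.List.getElem_pyRange_one 0 (n-1) k
        (by rw [PySem.List.length_pyRange_one]; omega)]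
    by_cases hcase : k < ((PySem.List.pyRange 1 (n+1) 1).drop (i+1).toNat).length
    · rw [List.getElem_append_left hcase, List.getElem_drop,
        PySem.List.getElem_pyRange_one 1 (n+1) _ (by simp at hcase ⊢; omega)]
      have hlt : i + 1 + (0 + k) < n := by simp [hlen] at hcase; omega
      rw [PySem.Int.mod_eq_emod_of_pos (by omega),
        Int.emod_eq_of_lt (by omega) hlt]
      push_cast; omega
    · rw [List.getElem_append_right (by omega), List.getElem_take,
        PySem.List.getElem_pyRange_one 1 (n+1) _ (by simp [hlen] at hcase ⊢; omega)]
      have hge : n ≤ i + 1 + (0 + k) := by simp [hlen] at hcase; omega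
      have he : (i + 1 + (0 + k)) % n = i + 1 + (0 + k) - n := by
        rw [← Int.sub_emod_right (i + 1 + (0 + k)) n]
        exact Int.emod_eq_of_lt (by omega) (by omega)
      rw [PySem.Int.mod_eq_emod_of_pos (by omega), he]
      simp [hlen]; omega

theorem pointwiseIff (n i j : Int) (hn : 2 ≤ n) (hi0 : 0 ≤ i) (hin : i < n)
    (hj0 : 0 ≤ j) (hjm : j < n - 1) :
    (isCuteList ((PySem.List.pyGetD (PySem.List.pyRange 1 (n+1) 1) i 0) ::
        (PySem.List.slice
            (PySem.List.slice (PySem.List.pyRange 1 (n+1) 1) (some (i + 1)) none ++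
             PySem.List.slice (PySem.List.pyRange 1 (n+1) 1) none (some i)) (some j) none ++
         PySem.List.slice
            (PySem.List.slice (PySem.List.pyRange 1 (n+1) 1) (some (i + 1)) none ++
             PySem.List.slice (PySem.List.pyRange 1 (n+1) 1) none (some i)) none (some j))) ≠ 0)
    ↔ goodB n i j = true := by
  set nl := PySem.List.pyRange 1 (n+1) 1 with hnl
  set rem := (PySem.List.pyRange 0 (n-1) 1).map (fun k => PySem.Int.mod (i + 1 + k) n + 1) with hrem
  have hsub : PySem.List.slice nl (some (i + 1)) none ++ PySem.List.slice nl none (some i) = rem := by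
    rw [PySem.List.slice_from _ (by omega), PySem.List.slice_to _ hi0]
    exact subEqRem n i hn hi0 hin
  rw [hsub]
  have hremlen : (rem.length : Int) = n - 1 := by
    simp [hrem, PySem.List.length_pyRange_one]; omega
  rw [PySem.List.slice_from _ hj0, PySem.List.slice_to _ hj0]
  set rot := rem.drop j.toNat ++ rem.take j.toNat with hrot
  have hrotlen : (rot.length : Int) = n - 1 := by simp [hrot]; omega
  have hstep : isCuteList ((PySem.List.pyGetD nl i 0) :: rot) = isCuteListAux 2 rot := by
    have hL : PySem.List.pyGetD nl i 0 = 1 + i := by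
      rw [PySem.List.pyGetD_eq_getElem _ _ hi0 (by rw [hnl, PySem.List.length_pyRange_one]; omega),
        PySem.List.getElem_pyRange_one 1 (n+1) _ (by rw [PySem.List.length_pyRange_one]; omega)]
      omega
    simp [isCuteList, isCuteListAux, hL]
  have hval : ∀ p : Int, 2 ≤ p → p ≤ n →
      PySem.List.pyGetD rot (p - 2) 0 = valF n i j p := by
    intro p hp2 hpn
    rw [hrot, rotGetD rem (n-1) j (p-2) hremlen hj0 hjm (by omega) (by omega), hrem,
      PySem.List.pyGetD_map_pyRange_of_nonneg _ _ _ _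
        (PySem.Int.mod_nonneg _ (by omega)) (PySem.Int.mod_lt _ (by omega)),
      valF, show j + (p - 2) = j + p - 2 by ring]
  have hvalN : ∀ k : Nat, (hk : k < rot.length) → rot[k] = valF n i j (2 + (k:Int)) := by
    intro k hk
    have h1 : PySem.List.pyGetD rot ((k:Int)) 0 = rot[k] := by
      rw [PySem.List.pyGetD_eq_getElem rot (d := 0) (by omega) (by omega)]
      simp
    have h2 := hval (2 + (k:Int)) (by omega) (by omega)
    rw [show (2 + (k:Int)) - 2 = ((k:Int)) by ring, h1] at h2
    exact h2
  rw [hstep, isCuteListAux_ne_zero rot 2, goodB, List.all_eq_true]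
  constructor
  · intro h p hp
    rw [PySem.List.mem_pyRange_one] at hp
    rw [decide_eq_true_iff]
    have := h (p-2).toNat (by omega)
    rw [hvalN (p-2).toNat (by omega)] at this
    rwa [show (2 + (((p-2).toNat : Nat) : Int)) = p by omega] at this
  · intro h k hk
    have hp := h (2 + (k : Int)) (by rw [PySem.List.mem_pyRange_one]; omega)
    rw [decide_eq_true_iff] at hp
    rwa [← hvalN k hk] at hp

-- A's count in closed form: the sum over i of the number of good rotations j
theorem A_char (n : Int) (hn : 2 ≤ n) :
    getCuteListCount n
      = ((PySem.List.pyRange 0 n 1).map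
          (fun i => ((PySem.List.pyRange 0 (n-1) 1).countP (fun j => goodB n i j) : Int))).sum := by
  unfold getCuteListCount
  dsimp only
  rw [PySem.List.foldl_congr_mem (g := fun acc i =>
      acc + ((PySem.List.pyRange 0 (n-1) 1).countP (fun j => goodB n i j) : Int))]
  · rw [show (fun (acc : Int) (i : Int) =>
        acc + ((PySem.List.pyRange 0 (n-1) 1).countP (fun j => goodB n i j) : Int))
      = fun acc i => acc +
          ((fun i => ((PySem.List.pyRange 0 (n-1) 1).countP (fun j => goodB n i j) : Int)) i) from rfl,
      PySem.List.foldl_add]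
    omega
  · intro acc i hi
    rw [PySem.List.mem_pyRange_one] at hi
    dsimp only
    rw [PySem.List.foldl_congr_mem (g := fun acc2 j =>
        if goodB n i j = true then acc2 + 1 else acc2)]
    · rw [PySem.List.foldl_ite_add_one]
      simp
    · intro acc2 j hj
      rw [PySem.List.mem_pyRange_one] at hj
      dsimp only
      rw [if_congr (pointwiseIff n i j hn hi.1 hi.2 hj.1 hj.2) rfl rfl]

-- a chain of filters is one filter by the conjunction of the predicates
theorem foldl_filter {α β : Type} (ps : List α) (q : α → β → Bool) (l : List β) :
    ps.foldl (fun l p => l.filter (q p)) l = l.filter (fun x => ps.all (fun p => q p x)) := by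
  induction ps generalizing l with
  | nil => simp
  | cons p t ih =>
    simp only [List.foldl_cons, ih, List.filter_filter, List.all_cons]
    apply List.filter_congr
    intro x hx
    simp [Bool.and_comm]

-- ===== VERDICT (by name: the statement is the Claim_ definition above) =====
theorem getCuteListCount_spec : Claim_equal_getCuteListCount := by
  intro number _
  unfold Spec_getCuteListCount
  by_cases h2 : number < 2
  · unfold getCuteListCount getCuteListCount_alt
    by_cases h0 : number ≤ 0
    · rw [PySem.List.pyRange_one_eq_nil h0]; rfl
    · have h1 : number = 1 := by omega
      subst h1; decide
  · have hn : 2 ≤ number := by omega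
    rw [A_char number hn]
    unfold getCuteListCount_alt
    dsimp only
    rw [PySem.List.foldl_congr_mem (g := fun count i => count +
        ((fun i => ((PySem.List.pyRange 0 (number-1) 1).countP
          (fun j => goodB number i j) : Int)) i))]
    · rw [PySem.List.foldl_add]
      omega
    · intro count i _
      dsimp only
      congr 1
      rw [foldl_filter, ← List.countP_eq_length_filter]
      congr 1
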